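-- pv_equiv track=rewrite | github.com/Vladplxn/yandex_algorithms_trainings_3 | 06_os_lite.py | func
-- ===== SOURCE A (Python) =====
-- def func(borders):
--     s = set()
--     for pair in borders:
--         to_remove = []
--         for set_pair in s:
--             if set_pair[0] <= pair[1] and pair[0] <= set_pair[1]:
--                 to_remove.append(set_pair)
--         s = s.difference(to_remove)
--         s.add(pair)
--
--     return len(s)
-- ===== SOURCE B (Python) =====
-- def func(borders):
--     # An interval survives iff this is its last occurrence and no later
--     # interval overlaps it; count survivors in one pass over the suffixes.
--     count = 0
--     for i, (a, b) in enumerate(borders):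
--         tail = borders[i + 1:]
--         if (a, b) not in tail and not any(x <= b and a <= y for x, y in tail):
--             count += 1
--     return count
-- ===== Notes on version B (the rewrite author's own statement) =====
-- stated objective: simpler
-- what changed: Instead of simulating the set with repeated overlap-removal and reinsertion, B makes one pass over the list and counts the intervals whose position is their last occurrence and which no later interval overlaps.
import Mathlib
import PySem

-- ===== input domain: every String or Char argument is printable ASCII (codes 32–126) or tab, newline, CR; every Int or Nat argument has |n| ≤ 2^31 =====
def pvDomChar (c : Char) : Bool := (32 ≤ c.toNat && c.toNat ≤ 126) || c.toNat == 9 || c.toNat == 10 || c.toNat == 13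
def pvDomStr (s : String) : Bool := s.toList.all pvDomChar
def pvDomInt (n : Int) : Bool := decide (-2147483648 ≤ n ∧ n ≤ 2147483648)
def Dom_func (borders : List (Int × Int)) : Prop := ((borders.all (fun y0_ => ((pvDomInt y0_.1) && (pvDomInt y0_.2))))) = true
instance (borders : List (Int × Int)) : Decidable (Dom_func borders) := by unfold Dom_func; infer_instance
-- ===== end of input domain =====

-- B replaces A's set-insertion simulation by a single pass that counts, for each
-- interval, whether this is its last occurrence with no later overlapping interval
-- (objective: simpler).

-- ===== PORT A =====
def funcStep (s : PySem.Set (Int × Int)) (pair : Int × Int) : PySem.Set (Int × Int) :=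
  let toRemove := s.filter (fun setPair => setPair.1 ≤ pair.2 && pair.1 ≤ setPair.2)
  let s2 := PySem.Set.diff s toRemove
  PySem.Set.add s2 pair

def func (borders : List (Int × Int)) : Int :=
  PySem.Set.len (borders.foldl funcStep PySem.Set.empty)

-- ===== PORT B =====
def func_alt : List (Int × Int) → Int
  | [] => 0
  | (a, b) :: tail =>
      (if !tail.contains (a, b) && !tail.any (fun q => q.1 ≤ b && a ≤ q.2) then 1 else 0)
        + func_alt tail

-- ===== PRECONDITION & SPEC =====
def Spec_func (borders : List (Int × Int)) (out : Int) : Prop := out = func_alt borders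
instance (borders : List (Int × Int)) (out : Int) : Decidable (Spec_func borders out) := by unfold Spec_func; infer_instance

-- ===== CLAIM (what is proved, stated in full; the proofs are below) =====
def Claim_equal_func : Prop := ∀ (borders : List (Int × Int)), Dom_func borders → Spec_func borders (func borders)

-- ===== LEMMAS AND PROOFS =====

-- overlap test used by both programs (proof helper only)
def pvOvb (a q : Int × Int) : Bool := q.1 ≤ a.2 && a.1 ≤ q.2

-- B's survival test: p is not repeated in t and overlaps nothing in t
def pvSurv (t : List (Int × Int)) (p : Int × Int) : Bool :=
  !t.contains p && !t.any (fun q => q.1 ≤ p.2 && p.1 ≤ q.2)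

theorem pvOvb_symm (a b : Int × Int) : pvOvb a b = pvOvb b a := by
  simp [pvOvb, Bool.and_comm]

theorem func_alt_cons (p : Int × Int) (t : List (Int × Int)) :
    func_alt (p :: t) = (if pvSurv t p then 1 else 0) + func_alt t := by
  obtain ⟨a, b⟩ := p
  simp [func_alt, pvSurv]

theorem funcStep_eq (s : List (Int × Int)) (p : Int × Int) :
    funcStep s p =
      (if (s.filter (fun q => !pvOvb p q)).contains p
       then s.filter (fun q => !pvOvb p q)
       else s.filter (fun q => !pvOvb p q) ++ [p]) := by
  have hdiff : PySem.Set.diff s (s.filter (fun q => pvOvb p q)) = s.filter (fun q => !pvOvb p q) := by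
    unfold PySem.Set.diff
    apply List.filter_congr
    intro q hq
    by_cases h : pvOvb p q = true <;>
      simp [h, hq, List.mem_filter]
  simp only [funcStep, PySem.Set.add, PySem.Set.contains, pvOvb] at *
  rw [hdiff]
  rfl

theorem funcStep_nodup (s : List (Int × Int)) (hs : s.Nodup) (p : Int × Int) :
    (funcStep s p).Nodup := by
  rw [funcStep_eq]
  split
  · exact hs.filter _
  · rename_i h
    have hp : p ∉ s.filter (fun q => !pvOvb p q) := by
      intro hmem
      exact h (by simpa [List.contains_iff_mem] using hmem)
    refine List.Nodup.append (hs.filter _) (List.nodup_singleton p) ?_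
    intro x hx hx2
    rw [List.mem_singleton] at hx2
    exact hp (hx2 ▸ hx)

theorem pvSurv_cons_ne (p t) (e : Int × Int) (he : e ≠ p) :
    pvSurv (p :: t) e = (!pvOvb p e && pvSurv t e) := by
  have h1 : (p == e) = false := by simp [(Ne.symm he)]
  simp only [pvSurv, List.contains_cons, List.any_cons, Bool.not_or]
  have : (p.1 ≤ e.2 && e.1 ≤ p.2) = pvOvb p e := by rw [pvOvb_symm]; rfl
  rw [this]
  have h1' : (e == p) = false := by simp [he]
  simp [h1', Bool.and_comm, Bool.and_left_comm]

theorem pvSurv_cons_self (p : Int × Int) (t : List (Int × Int)) :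
    pvSurv (p :: t) p = false := by
  simp [pvSurv]

theorem step_count (s : List (Int × Int)) (hnd : s.Nodup) (p : Int × Int) (t : List (Int × Int)) :
    ((funcStep s p).filter (pvSurv t)).length
      = (if pvSurv t p then 1 else 0) + ((s.filter (pvSurv (p :: t))).length) := by
  rw [funcStep_eq]
  by_cases hc : (s.filter (fun q => !pvOvb p q)).contains p = true
  · -- p already present after the removal: p ∈ s and ¬ ovb p p
    rw [if_pos hc]
    have hmem : p ∈ s ∧ pvOvb p p = false := by
      have := (List.contains_iff_mem).1 hc
      have := List.mem_filter.1 this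
      exact ⟨this.1, by simpa using this.2⟩
    obtain ⟨u, v, rfl⟩ := List.append_of_mem hmem.1
    have hpu : p ∉ u := by
      intro h; exact (List.disjoint_of_nodup_append hnd h) (List.mem_cons_self ..)
    have hpv : p ∉ v := by
      have h2 := (List.nodup_append.1 hnd).2.1
      exact (List.nodup_cons.1 h2).1
    have hcongr : ∀ w : List (Int × Int), p ∉ w →
        w.filter (fun e => pvSurv t e && !pvOvb p e) = w.filter (pvSurv (p :: t)) := by
      intro w hw
      apply List.filter_congr
      intro e hew
      have hne : e ≠ p := fun h => hw (h ▸ hew)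
      rw [pvSurv_cons_ne p t e hne, Bool.and_comm]
    have e1 : List.filter (fun q => !pvOvb p q) (u ++ p :: v)
        = List.filter (fun q => !pvOvb p q) u ++ p :: List.filter (fun q => !pvOvb p q) v := by
      simp [List.filter_append, hmem.2]
    have e2 : List.filter (pvSurv (p :: t)) (u ++ p :: v)
        = List.filter (pvSurv (p :: t)) u ++ List.filter (pvSurv (p :: t)) v := by
      simp [List.filter_append, pvSurv_cons_self]
    rw [e1, e2, List.filter_append, List.filter_cons, List.filter_filter, List.filter_filter,
      hcongr u hpu, hcongr v hpv]
    by_cases hst : pvSurv t p = true <;> simp [hst, List.length_append] <;> omega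
  · rw [if_neg hc]
    have hfilter : s.filter (fun e => pvSurv t e && !pvOvb p e) = s.filter (pvSurv (p :: t)) := by
      apply List.filter_congr
      intro e hes
      by_cases hep : e = p
      · subst hep
        have hov : pvOvb e e = true := by
          by_contra h
          exact hc (List.contains_iff_mem.2 (List.mem_filter.2 ⟨hes, by simpa using h⟩))
        simp [hov, pvSurv_cons_self]
      · rw [pvSurv_cons_ne p t e hep, Bool.and_comm]
    simp only [List.filter_append, List.filter_filter]
    rw [hfilter]
    by_cases hst : pvSurv t p = true <;>
      simp [hst, List.length_append] <;> omega

theorem main_count (l : List (Int × Int)) : ∀ s : List (Int × Int), s.Nodup →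
    (((l.foldl funcStep s).length : Int)) = func_alt l + ((s.filter (pvSurv l)).length : Int) := by
  induction l with
  | nil =>
      intro s _
      have : s.filter (pvSurv []) = s := by
        apply List.filter_eq_self.2
        intro e _
        simp [pvSurv]
      simp [func_alt, this]
  | cons p t ih =>
      intro s hs
      have h1 := ih (funcStep s p) (funcStep_nodup s hs p)
      simp only [List.foldl_cons]
      rw [h1, func_alt_cons, step_count s hs p t]
      push_cast
      ring

-- ===== VERDICT (by name: the statement is the Claim_ definition above) =====
theorem func_spec : Claim_equal_func := by
  intro borders _
  unfold Spec_func func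
  have := main_count borders [] List.nodup_nil
  simpa [PySem.Set.len, PySem.Set.empty] using this
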